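-- pv_equiv track=rewrite | github.com/DayAlgorithm/Kwak-Yong-Jin | 2.화/피자판매.py | find_case
-- ===== SOURCE A (Python) =====
-- from collections import defaultdict
--
-- def find_case(pizza):
--     n = len(pizza)
--     case = defaultdict(int)
--     extended = pizza * 2
--     for size in range(1, n):
--         curr_sum = sum(extended[:size])
--         case[curr_sum] += 1
--         for i in range(1, n):
--             curr_sum = curr_sum - extended[i-1] + extended[i+size-1]
--             case[curr_sum] += 1
--     case[sum(pizza)] += 1
--     return case
-- ===== SOURCE B (Python) =====
-- from collections import defaultdict
--
-- def find_case(pizza):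
--     n = len(pizza)
--     extended = pizza * 2
--     prefix = [0]
--     for x in extended:
--         prefix.append(prefix[-1] + x)
--     case = defaultdict(int)
--     for size in range(1, n):
--         for start in range(n):
--             case[prefix[start + size] - prefix[start]] += 1
--     case[prefix[n]] += 1
--     return case
-- ===== Notes on version B (the rewrite author's own statement) =====
-- stated objective: alternative
-- what changed: B precomputes a prefix-sum table over pizza*2 once and obtains every circular-window sum as a table difference prefix[start+size]-prefix[start], replacing A's per-size slice-sum and maintained sliding running sum.
import Mathlib
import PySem

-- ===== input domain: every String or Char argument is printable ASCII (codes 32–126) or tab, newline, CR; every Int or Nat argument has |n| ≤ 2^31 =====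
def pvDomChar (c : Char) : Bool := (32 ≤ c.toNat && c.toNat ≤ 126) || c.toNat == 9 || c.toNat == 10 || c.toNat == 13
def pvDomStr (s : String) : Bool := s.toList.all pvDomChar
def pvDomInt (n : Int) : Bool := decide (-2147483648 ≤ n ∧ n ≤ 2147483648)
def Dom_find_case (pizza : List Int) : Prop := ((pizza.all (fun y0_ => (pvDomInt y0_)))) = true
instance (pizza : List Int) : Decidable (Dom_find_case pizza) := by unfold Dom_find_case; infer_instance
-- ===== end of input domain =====

-- B replaces A's per-size slice sum and maintained sliding running sum by a prefix-sum table built once.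

-- ===== PORT A =====
def find_case (pizza : List Int) : List (Int × Int) :=
  let n : Int := (pizza.length : Int)
  let extended := pizza ++ pizza
  let case1 := (PySem.List.pyRange 1 n 1).foldl (fun (cs : PySem.Dict Int Int) size =>
      let curr0 := (PySem.List.slice extended none (some size)).sum
      let st := (PySem.List.pyRange 1 n 1).foldl
        (fun (p : PySem.Dict Int Int × Int) i =>
          let curr := p.2 - PySem.List.pyGetD extended (i-1) 0
                          + PySem.List.pyGetD extended (i+size-1) 0
          (p.1.modify curr 0 (· + 1), curr))
        (cs.modify curr0 0 (· + 1), curr0)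
      st.1) PySem.Dict.empty
  (case1.modify pizza.sum 0 (· + 1)).items

-- ===== PORT B =====
def find_case_alt (pizza : List Int) : List (Int × Int) :=
  let n : Int := (pizza.length : Int)
  let extended := pizza ++ pizza
  let pref := extended.foldl (fun (p : List Int) x => p ++ [PySem.List.pyGetD p (-1) 0 + x]) [(0 : Int)]
  let case1 := (PySem.List.pyRange 1 n 1).foldl (fun (cs : PySem.Dict Int Int) size =>
      (PySem.List.pyRange 0 n 1).foldl (fun (cs : PySem.Dict Int Int) start =>
          cs.modify (PySem.List.pyGetD pref (start+size) 0 - PySem.List.pyGetD pref start 0) 0 (· + 1))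
        cs) PySem.Dict.empty
  (case1.modify (PySem.List.pyGetD pref n 0) 0 (· + 1)).items

-- ===== PRECONDITION & SPEC =====
def Spec_find_case (pizza : List Int) (out : List (Int × Int)) : Prop := out = find_case_alt pizza
instance (pizza : List Int) (out : List (Int × Int)) : Decidable (Spec_find_case pizza out) := by unfold Spec_find_case; infer_instance

-- ===== CLAIM (what is proved, stated in full; the proofs are below) =====
def Claim_equal_find_case : Prop := ∀ (pizza : List Int), Dom_find_case pizza → Spec_find_case pizza (find_case pizza)

-- ===== LEMMAS AND PROOFS =====

-- B's append loop builds the running-sum scan of the list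
theorem pv_scan_spec (l : List Int) : ∀ (p : List Int) (s : Int),
    l.foldl (fun (p : List Int) x => p ++ [PySem.List.pyGetD p (-1) 0 + x]) (p ++ [s])
      = p ++ List.scanl (· + ·) s l := by
  induction l with
  | nil => intro p s; simp
  | cons x t ih =>
    intro p s
    simp only [List.foldl_cons, PySem.List.pyGetD_neg_one_append_singleton, List.scanl_cons]
    have := ih (p ++ [s]) (s + x)
    simpa using this

theorem pv_scan_getD (l : List Int) : ∀ (s : Int) (k : Nat), k ≤ l.length →
    (List.scanl (· + ·) s l).getD k 0 = s + (l.take k).sum := by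
  induction l with
  | nil =>
    intro s k hk
    have hk0 : k = 0 := Nat.le_zero.mp (by simpa using hk)
    subst hk0; simp
  | cons x t ih =>
    intro s k hk
    cases k with
    | zero => simp
    | succ k =>
      simp only [List.scanl_cons, List.getD_cons_succ, List.take_succ_cons, List.sum_cons]
      rw [ih (s + x) k (by simpa using hk)]
      ring

theorem find_case_spec_aux (pizza : List Int) : find_case pizza = find_case_alt pizza := by
  simp only [find_case, find_case_alt]
  set n : Int := (pizza.length : Int) with hn
  set extended : List Int := pizza ++ pizza with hext
  have hlen : (extended.length : Int) = 2 * n := by simp [hext, hn]; ring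
  have hpre : extended.foldl (fun (p : List Int) x => p ++ [PySem.List.pyGetD p (-1) 0 + x]) [(0 : Int)]
      = List.scanl (· + ·) 0 extended := by
    simpa using pv_scan_spec extended [] 0
  set pf : Int → Int := fun k => (extended.take k.toNat).sum with hpf
  have hget : ∀ (k : Int), 0 ≤ k → k ≤ 2 * n →
      PySem.List.pyGetD (List.scanl (· + ·) 0 extended) k 0 = pf k := by
    intro k hk0 hk2
    have hkn : (k.toNat : Int) = k := Int.toNat_of_nonneg hk0
    have hkl : k.toNat ≤ extended.length := by omega
    rw [← hkn, PySem.List.pyGetD_natCast]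
    rw [pv_scan_getD extended 0 k.toNat hkl]
    simp only [hpf, zero_add, Int.toNat_natCast]
  have hstep : ∀ (k : Int), 0 ≤ k → k < 2 * n →
      pf (k + 1) = pf k + PySem.List.pyGetD extended k 0 := by
    intro k hk0 hk2
    have hklt : k.toNat < extended.length := by omega
    have h1 : (k + 1).toNat = k.toNat + 1 := by omega
    have hg : PySem.List.pyGetD extended k 0 = extended[k.toNat] :=
      PySem.List.pyGetD_eq_getElem extended 0 hk0 (by omega)
    simp only [hpf, h1, hg]
    exact List.sum_take_succ extended k.toNat hklt
  rw [hpre]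
  have hfinal : PySem.List.pyGetD (List.scanl (· + ·) 0 extended) n 0 = pizza.sum := by
    rw [hget n (by positivity) (by omega)]
    simp [hpf, hext, hn]
  rw [hfinal]
  refine congrArg (fun d : PySem.Dict Int Int => (d.modify pizza.sum 0 (· + 1)).items) ?_
  refine PySem.List.foldl_congr_mem _ _ _ _ ?_
  intro cs size hsize
  rw [PySem.List.mem_pyRange_one] at hsize
  obtain ⟨h1s, hsn⟩ := hsize
  obtain ⟨sz, rfl⟩ : ∃ sz : Nat, size = (sz : Int) := ⟨size.toNat, by omega⟩
  have hcurr0 : (PySem.List.slice extended none (some (sz : Int))).sum = (extended.take sz).sum := by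
    rw [PySem.List.slice_to_natCast]
  have h0 : (0:Int) < n := by omega
  rw [PySem.List.pyRange_one_cons h0]
  simp only [List.foldl_cons, zero_add]
  have hhead : PySem.List.pyGetD (List.scanl (· + ·) 0 extended) (sz : Int) 0
      - PySem.List.pyGetD (List.scanl (· + ·) 0 extended) 0 0 = (extended.take sz).sum := by
    rw [hget (sz : Int) (by positivity) (by omega), hget 0 le_rfl (by omega)]
    simp [hpf]
  rw [hcurr0, hhead]
  suffices h : ∀ (m : Nat) (i : Int) (d : PySem.Dict Int Int), 1 ≤ i → n - i = (m : Int) →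
      ((PySem.List.pyRange i n 1).foldl
        (fun (p : PySem.Dict Int Int × Int) j =>
          (p.1.modify (p.2 - PySem.List.pyGetD extended (j-1) 0
                          + PySem.List.pyGetD extended (j+(sz:Int)-1) 0) 0 (· + 1),
           p.2 - PySem.List.pyGetD extended (j-1) 0
               + PySem.List.pyGetD extended (j+(sz:Int)-1) 0))
        (d, pf (i - 1 + (sz:Int)) - pf (i - 1))).1
      = (PySem.List.pyRange i n 1).foldl
          (fun (cs : PySem.Dict Int Int) start =>
            cs.modify (PySem.List.pyGetD (List.scanl (· + ·) 0 extended) (start+(sz:Int)) 0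
                       - PySem.List.pyGetD (List.scanl (· + ·) 0 extended) start 0) 0 (· + 1)) d by
    have hst : pf (1 - 1 + (sz:Int)) - pf (1 - 1) = (extended.take sz).sum := by
      have e : (1:Int) - 1 + (sz:Int) = (sz:Int) := by ring
      rw [e]
      simp [hpf]
    have := h (n - 1).toNat 1 (cs.modify (extended.take sz).sum 0 (· + 1)) le_rfl (by omega)
    rw [hst] at this
    exact this
  intro m
  induction m with
  | zero =>
    intro i d h1i hm
    rw [PySem.List.pyRange_one_eq_nil (by omega)]
    simp
  | succ m ih =>
    intro i d h1i hm
    rw [PySem.List.pyRange_one_cons (by omega)]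
    simp only [List.foldl_cons]
    have hga : PySem.List.pyGetD (List.scanl (· + ·) 0 extended) (i + (sz:Int)) 0 = pf (i + (sz:Int)) :=
      hget (i + (sz:Int)) (by omega) (by omega)
    have hgb : PySem.List.pyGetD (List.scanl (· + ·) 0 extended) i 0 = pf i :=
      hget i (by omega) (by omega)
    have hkey : pf (i - 1 + (sz:Int)) - pf (i - 1) - PySem.List.pyGetD extended (i-1) 0
        + PySem.List.pyGetD extended (i+(sz:Int)-1) 0 = pf (i + (sz:Int)) - pf i := by
      have e1 : pf i = pf (i - 1) + PySem.List.pyGetD extended (i - 1) 0 := by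
        have := hstep (i - 1) (by omega) (by omega)
        rw [sub_add_cancel] at this
        exact this
      have e2 : pf (i + (sz:Int)) = pf (i + (sz:Int) - 1) + PySem.List.pyGetD extended (i + (sz:Int) - 1) 0 := by
        have := hstep (i + (sz:Int) - 1) (by omega) (by omega)
        rw [sub_add_cancel] at this
        exact this
      have e3 : i - 1 + (sz:Int) = i + (sz:Int) - 1 := by ring
      rw [e1, e2, e3]; ring
    rw [hga, hgb, hkey]
    have := ih (i + 1) (d.modify (pf (i + (sz:Int)) - pf i) 0 (· + 1)) (by omega) (by omega)
    simp only [add_sub_cancel_right] at this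
    exact this

-- ===== VERDICT (by name: the statement is the Claim_ definition above) =====
theorem find_case_spec : Claim_equal_find_case := by
  intro pizza _
  unfold Spec_find_case
  exact find_case_spec_aux pizza
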